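-- pv_equiv track=rewrite | github.com/DivyG007/inlp-assignments | Tokenization&Language-Modeling/language_models.py | build_continuation_unigram
-- ===== SOURCE A (Python) =====
-- from collections import Counter
--
-- def build_continuation_unigram(bigram_counts):
--     cont_unigram = Counter()
--     seen = {}
--     for (w1, w2) in bigram_counts.keys():
--         if w2 not in seen:
--             seen[w2] = set()
--         seen[w2].add(w1)
--     for w2, preds in seen.items():
--         cont_unigram[w2] = len(preds)
--     return cont_unigram
-- ===== SOURCE B (Python) =====
-- from collections import Counter
--
-- def build_continuation_unigram(bigram_counts):
--     # dict keys (w1, w2) are unique, so the number of distinct predecessors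
--     # of w2 is simply the number of keys whose second component is w2.
--     return Counter(w2 for (w1, w2) in bigram_counts)
-- ===== Notes on version B (the rewrite author's own statement) =====
-- stated objective: simpler
-- what changed: Replaces A's two passes (build a dict of predecessor-sets with membership tests, then copy set sizes into a Counter) by a single counting comprehension over the second components of the keys, exploiting that dict keys are unique so the set dedup is redundant.
import Mathlib
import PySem

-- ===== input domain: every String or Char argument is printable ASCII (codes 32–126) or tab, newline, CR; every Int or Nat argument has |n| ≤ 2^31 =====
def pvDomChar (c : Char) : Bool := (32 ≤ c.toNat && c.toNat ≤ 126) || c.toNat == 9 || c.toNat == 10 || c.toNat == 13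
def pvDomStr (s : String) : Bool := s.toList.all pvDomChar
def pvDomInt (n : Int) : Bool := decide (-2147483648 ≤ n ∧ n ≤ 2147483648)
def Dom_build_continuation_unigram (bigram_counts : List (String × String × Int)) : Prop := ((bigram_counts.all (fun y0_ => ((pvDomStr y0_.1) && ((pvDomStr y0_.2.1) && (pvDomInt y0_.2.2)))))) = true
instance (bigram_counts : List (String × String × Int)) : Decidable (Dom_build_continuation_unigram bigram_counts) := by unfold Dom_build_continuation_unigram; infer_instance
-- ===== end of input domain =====

-- B replaces A's dict-of-predecessor-sets + copy pass by one counting pass over the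
-- keys' second components (dict keys are unique, so the set dedup is redundant): simpler.


-- ===== PORT A =====
def build_continuation_unigram (bigram_counts : List (String × String × Int)) : List (String × Int) :=
  -- seen = {}; for (w1, w2) in bigram_counts.keys(): if w2 not in seen: seen[w2] = set(); seen[w2].add(w1)
  let seen : PySem.Dict String (PySem.Set String) :=
    bigram_counts.foldl
      (fun s p =>
        let s := if s.contains p.2.1 then s else s.insert p.2.1 PySem.Set.empty
        s.modify p.2.1 PySem.Set.empty (fun preds => PySem.Set.add preds p.1))
      PySem.Dict.empty
  -- cont_unigram = Counter(); for w2, preds in seen.items(): cont_unigram[w2] = len(preds)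
  (seen.items.foldl (fun c kv => c.insert kv.1 (PySem.Set.len kv.2))
      PySem.Dict.empty).items

-- ===== PORT B =====
def build_continuation_unigram_alt (bigram_counts : List (String × String × Int)) : List (String × Int) :=
  -- return Counter(w2 for (w1, w2) in bigram_counts)
  (PySem.Dict.counter (bigram_counts.map (fun p => p.2.1))).items

-- ===== PRECONDITION & SPEC =====
-- Pre_ excludes association lists with duplicate (w1, w2) keys: such a list does not
-- represent any Python dict (dict keys are unique), so A never receives it.
def Pre_build_continuation_unigram (bigram_counts : List (String × String × Int)) : Prop :=
  (bigram_counts.map (fun p => (p.1, p.2.1))).Nodup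
instance (bigram_counts : List (String × String × Int)) : Decidable (Pre_build_continuation_unigram bigram_counts) := by unfold Pre_build_continuation_unigram; infer_instance

def pvWitness_build_continuation_unigram : (List (String × String × Int)) :=
  [("a", "b", 2), ("c", "b", 1), ("a", "a", 1)]

def Spec_build_continuation_unigram (bigram_counts : List (String × String × Int)) (out : List (String × Int)) : Prop := out = build_continuation_unigram_alt bigram_counts
instance (bigram_counts : List (String × String × Int)) (out : List (String × Int)) : Decidable (Spec_build_continuation_unigram bigram_counts out) := by unfold Spec_build_continuation_unigram; infer_instance

-- ===== CLAIM (what is proved, stated in full; the proofs are below) =====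
def Claim_equal_build_continuation_unigram : Prop := ∀ (bigram_counts : List (String × String × Int)), Dom_build_continuation_unigram bigram_counts → Pre_build_continuation_unigram bigram_counts → Spec_build_continuation_unigram bigram_counts (build_continuation_unigram bigram_counts)

-- ===== LEMMAS AND PROOFS =====

-- A's loop body (membership test + fresh empty set + add) is exactly one dict modify.
theorem pvStepA_eq (s : PySem.Dict String (PySem.Set String)) (p : String × String × Int) :
    (let s' := if s.contains p.2.1 then s else s.insert p.2.1 PySem.Set.empty
     s'.modify p.2.1 PySem.Set.empty (fun preds => PySem.Set.add preds p.1)) =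
    s.modify p.2.1 PySem.Set.empty (fun preds => PySem.Set.add preds p.1) := by
  by_cases h : s.contains p.2.1 = true
  · simp [h]
  · simp only [Bool.not_eq_true] at h
    have hg : s.getD p.2.1 ([] : PySem.Set String) = [] :=
      PySem.Dict.getD_of_not_contains s _ h
    simp [h, PySem.Dict.modify, PySem.Dict.getD_insert_self,
      PySem.Dict.insert_insert_self, hg, PySem.Set.add]

-- value of the accumulated predecessor dict at a key
theorem pvGetD_fold (l : List (String × String × Int))
    (d : PySem.Dict String (PySem.Set String)) (w : String) :
    (l.foldl (fun s p => s.modify p.2.1 PySem.Set.empty (fun preds => PySem.Set.add preds p.1)) d).getD w PySem.Set.empty =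
    PySem.Set.update (d.getD w PySem.Set.empty)
      ((l.filter (fun p => p.2.1 == w)).map (fun p => p.1)) := by
  induction l generalizing d with
  | nil => simp [PySem.Set.update]
  | cons p l ih =>
    simp only [List.foldl_cons, ih, List.filter_cons]
    by_cases h : p.2.1 = w
    · simp [h, PySem.Set.update_cons]
    · have h' : (p.2.1 == w) = false := by simp [h]
      simp [h', PySem.Dict.getD_modify, Ne.symm h]

-- under unique (w1, w2) keys the predecessor list of w is already duplicate-free
theorem pvPredsNodup (bc : List (String × String × Int))
    (hnd : (bc.map (fun p => (p.1, p.2.1))).Nodup) (w : String) :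
    ((bc.filter (fun p => p.2.1 == w)).map (fun p => p.1)).Nodup := by
  have hf : ((bc.filter (fun p => p.2.1 == w)).map (fun p => (p.1, p.2.1))).Nodup := by
    have h2 : ((bc.map (fun p => (p.1, p.2.1))).filter (fun q => q.2 == w)).Nodup :=
      hnd.filter _
    simpa [List.filter_map, Function.comp] using h2
  have hinj : ∀ x ∈ bc.filter (fun p => p.2.1 == w), ∀ y ∈ bc.filter (fun p => p.2.1 == w),
      (fun p : String × String × Int => (p.1, p.2.1)) x =
      (fun p : String × String × Int => (p.1, p.2.1)) y → x.1 = y.1 := by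
    intro x _ y _ hxy
    simpa using congrArg Prod.fst hxy
  have hcomp : (bc.filter (fun p => p.2.1 == w)).map (fun p => p.1) =
      ((bc.filter (fun p => p.2.1 == w)).map (fun p => (p.1, p.2.1))).map (fun q => q.1) := by
    simp
  rw [hcomp]
  refine List.Nodup.map_on ?_ hf
  intro x hx y hy hxy
  simp only [List.mem_map, List.mem_filter] at hx hy
  obtain ⟨a, ⟨ha, haw⟩, rfl⟩ := hx
  obtain ⟨b, ⟨hb, hbw⟩, rfl⟩ := hy
  simp only [beq_iff_eq] at haw hbw
  simp_all

theorem build_continuation_unigram_spec_aux (bc : List (String × String × Int))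
    (hnd : (bc.map (fun p => (p.1, p.2.1))).Nodup) :
    build_continuation_unigram bc = build_continuation_unigram_alt bc := by
  unfold build_continuation_unigram build_continuation_unigram_alt
  set xs := bc.map (fun p => p.2.1) with hxs
  -- rewrite A's first loop to a plain modify-fold
  have hfold :
      bc.foldl (fun s p =>
        let s' := if s.contains p.2.1 then s else s.insert p.2.1 PySem.Set.empty
        s'.modify p.2.1 PySem.Set.empty (fun preds => PySem.Set.add preds p.1)) PySem.Dict.empty =
      bc.foldl (fun s p => s.modify p.2.1 PySem.Set.empty (fun preds => PySem.Set.add preds p.1)) PySem.Dict.empty := by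
    congr 1
    funext s p
    exact pvStepA_eq s p
  rw [hfold]
  set seen := bc.foldl (fun s p => s.modify p.2.1 PySem.Set.empty (fun preds => PySem.Set.add preds p.1)) PySem.Dict.empty with hseen
  have hkeys : seen.keys = PySem.Set.ofList xs := by
    rw [hseen, PySem.Dict.keys_foldl_modify_key bc (fun p => p.2.1) PySem.Set.empty
      (fun _ p => fun preds => PySem.Set.add preds p.1)]
    simp [PySem.Set.update_nil_left, PySem.Dict.keys_empty, hxs]
  have hknd : seen.keys.Nodup := by rw [hkeys]; exact PySem.Set.nodup_ofList xs
  have hitems : seen.items = seen.keys.map (fun k => (k, seen.getD k PySem.Set.empty)) :=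
    PySem.Dict.items_eq_map_keys seen hknd PySem.Set.empty
  -- A's second loop appends fresh distinct keys into an empty dict
  have hsecond := PySem.Dict.items_foldl_insert_fresh seen.items
      (fun kv : String × PySem.Set String => kv.1)
      (fun kv => (PySem.Set.len kv.2)) PySem.Dict.empty
      (fun a _ => PySem.Dict.contains_empty _) (by
        have : seen.items.map (fun kv : String × PySem.Set String => kv.1) = seen.keys := rfl
        rw [this]; exact hknd)
  rw [hsecond, PySem.Dict.items_counter]
  simp only [PySem.Dict.empty, hitems, List.map_map, List.nil_append]
  rw [hkeys]
  apply List.map_congr_left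
  intro w _
  simp only [Function.comp]
  congr 1
  -- len of the predecessor set at w equals the multiplicity of w among the xs
  have hget : seen.getD w PySem.Set.empty =
      PySem.Set.ofList ((bc.filter (fun p => p.2.1 == w)).map (fun p => p.1)) := by
    rw [hseen, pvGetD_fold]
    simp [PySem.Set.update_nil_left]
  rw [hget, PySem.Set.ofList_eq_self_of_nodup _ (pvPredsNodup bc hnd w)]
  have hcount : xs.count w = (bc.filter (fun p => p.2.1 == w)).length := by
    rw [hxs, List.count_eq_length_filter]
    have : (bc.map (fun p => p.2.1)).filter (fun x => x == w) =
        (bc.filter (fun p => p.2.1 == w)).map (fun p => p.2.1) := by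
      rw [List.filter_map]
      simp only [Function.comp_def]
    rw [this, List.length_map]
  simp [PySem.Set.len, hcount, List.length_map]

-- ===== VERDICT (by name: the statement is the Claim_ definition above) =====
theorem build_continuation_unigram_spec : Claim_equal_build_continuation_unigram := by
  intro bc _ hpre
  exact build_continuation_unigram_spec_aux bc hpre
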